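-- pv_equiv track=rewrite | github.com/Swali295/spinnaker-for-gcp | greedy florist.py | restaurant
-- ===== SOURCE A (Python) =====
-- def restaurant(l, b):
--     #
--     # Write your code here.
--     a=l*b
--     t=[]
--     for i in range(1,(a//2)):
--         if (a%i==0)and (i<=b or i<=l):
--             t.append(i)
--     t.sort(reverse=True)
--     for i in t:
--         for j in t:
--             if(i==j):
--                 if(a%i)==0 and i*i<=a:
--                     return(a//(i*i))
-- ===== SOURCE B (Python) =====
-- def restaurant(l, b):
--     a = l * b
--     half = a // 2
--     best = None
--     i = 1
--     while i * i <= a: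
--         if a % i == 0 and i < half and (i <= b or i <= l):
--             best = i
--         i += 1
--     return None if best is None else a // (best * best)
-- ===== Notes on version B (the rewrite author's own statement) =====
-- stated objective: faster
-- what changed: Instead of collecting all divisors up to a//2 in a list, reverse-sorting it and scanning it with a quadratic nested loop, B makes a single upward pass over i with i*i <= a (every returnable divisor satisfies this) keeping the largest qualifying divisor.
import Mathlib
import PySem

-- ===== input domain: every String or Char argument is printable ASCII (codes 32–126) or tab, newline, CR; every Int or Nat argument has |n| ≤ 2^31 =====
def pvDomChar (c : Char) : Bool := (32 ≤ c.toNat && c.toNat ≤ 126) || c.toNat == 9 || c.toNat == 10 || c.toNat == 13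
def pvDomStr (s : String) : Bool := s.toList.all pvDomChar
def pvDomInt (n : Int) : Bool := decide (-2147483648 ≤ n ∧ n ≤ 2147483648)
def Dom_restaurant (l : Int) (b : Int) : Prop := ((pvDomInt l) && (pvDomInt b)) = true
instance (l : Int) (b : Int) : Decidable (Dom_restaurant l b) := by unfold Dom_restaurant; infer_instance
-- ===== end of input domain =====

-- B replaces A's collect-all-divisors list + reverse sort + quadratic nested scan by a single
-- upward pass over i with i*i ≤ l*b keeping the largest qualifying divisor (objective: faster).

-- ===== PORT A =====
-- inner 'for j in t' loop of A
def aInner (a : Int) (i : Int) : List Int → Option Int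
  | [] => none
  | j :: js =>
    if i == j then
      if PySem.Int.mod a i == 0 && decide (i * i ≤ a) then
        some (PySem.Int.floordiv a (i * i))
      else aInner a i js
    else aInner a i js

-- outer 'for i in t' loop of A
def aOuter (a : Int) (t : List Int) : List Int → Option Int
  | [] => none
  | i :: is =>
    match aInner a i t with
    | some r => some r
    | none => aOuter a t is

def restaurant (l : Int) (b : Int) : Option Int :=
  let a := l * b
  let t := (PySem.List.pyRange 1 (PySem.Int.floordiv a 2) 1).foldl
    (fun acc i =>
      if PySem.Int.mod a i == 0 && (decide (i ≤ b) || decide (i ≤ l)) then acc ++ [i] else acc) []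
  let ts := PySem.List.sorted t (fun x => x) true
  aOuter a ts ts

-- ===== PORT B =====
-- 'while i*i <= a' loop of B; the '1 ≤ i' conjunct only makes the recursion total
-- (it is invariant in B, which starts at i = 1 and increments)
def altLoop (a l b half : Int) (i : Int) (best : Option Int) : Option Int :=
  if h : i * i ≤ a ∧ 1 ≤ i then
    altLoop a l b half (i + 1)
      (if PySem.Int.mod a i = 0 ∧ i < half ∧ (i ≤ b ∨ i ≤ l) then some i else best)
  else best
termination_by (a + 1 - i).toNat
decreasing_by
  have h1 : i * 1 ≤ i * i := by
    exact mul_le_mul_of_nonneg_left h.2 (by omega)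
  simp only [mul_one] at h1
  omega

def restaurant_alt (l : Int) (b : Int) : Option Int :=
  let a := l * b
  let half := PySem.Int.floordiv a 2
  match altLoop a l b half 1 none with
  | none => none
  | some best => some (PySem.Int.floordiv a (best * best))

-- ===== PRECONDITION & SPEC =====
def Spec_restaurant (l : Int) (b : Int) (out : Option Int) : Prop := out = restaurant_alt l b
instance (l : Int) (b : Int) (out : Option Int) : Decidable (Spec_restaurant l b out) := by unfold Spec_restaurant; infer_instance

-- ===== CLAIM (what is proved, stated in full; the proofs are below) =====
def Claim_equal_restaurant : Prop := ∀ (l : Int) (b : Int), Dom_restaurant l b → Spec_restaurant l b (restaurant l b)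

-- ===== LEMMAS AND PROOFS =====

-- i qualifies for a return in A: in range(1, a//2), divides a, bounded by l or b, and i*i ≤ a
def Good (l b i : Int) : Prop :=
  1 ≤ i ∧ i < PySem.Int.floordiv (l * b) 2 ∧ PySem.Int.mod (l * b) i = 0 ∧
    (i ≤ b ∨ i ≤ l) ∧ i * i ≤ l * b

lemma aInner_eq (a i : Int) (t : List Int) :
    aInner a i t =
      if i ∈ t ∧ (PySem.Int.mod a i == 0 && decide (i * i ≤ a)) = true then
        some (PySem.Int.floordiv a (i * i))
      else none := by
  induction t with
  | nil => simp [aInner]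
  | cons j js ih =>
    by_cases hij : i = j
    · subst hij
      by_cases hc : (PySem.Int.mod a i == 0 && decide (i * i ≤ a)) = true
      · simp [aInner, hc]
      · simp [aInner, hc, ih]
    · simp [aInner, hij, ih]

lemma aOuter_eq (a : Int) (t : List Int) (xs : List Int) (hsub : ∀ i ∈ xs, i ∈ t) :
    aOuter a t xs =
      (xs.find? (fun i => PySem.Int.mod a i == 0 && decide (i * i ≤ a))).map
        (fun i => PySem.Int.floordiv a (i * i)) := by
  induction xs with
  | nil => simp [aOuter]
  | cons i is ih =>
    have hi : i ∈ t := hsub i (List.mem_cons_self ..)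
    by_cases hc : (PySem.Int.mod a i == 0 && decide (i * i ≤ a)) = true
    · have h1 : aInner a i t = some (PySem.Int.floordiv a (i * i)) := by
        simp [aInner_eq, hi, hc]
      rw [List.find?_cons_of_pos (p := fun i => PySem.Int.mod a i == 0 && decide (i * i ≤ a)) hc]
      simp only [aOuter, h1, Option.map_some]
    · have h1 : aInner a i t = none := by simp [aInner_eq, hc]
      rw [List.find?_cons_of_neg (p := fun i => PySem.Int.mod a i == 0 && decide (i * i ≤ a)) hc]
      simp only [aOuter, h1]
      exact ih (fun j hj => hsub j (List.mem_cons_of_mem _ hj))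

lemma find?_greatest (q : Int → Bool) (r : List Int) (g : Int)
    (hp : r.Pairwise (· > ·)) (hg : g ∈ r) (hq : q g = true)
    (hmax : ∀ y ∈ r, q y = true → y ≤ g) : r.find? q = some g := by
  induction r with
  | nil => simp at hg
  | cons x xs ih =>
    rcases List.pairwise_cons.mp hp with ⟨hx, hxs⟩
    by_cases hxg : x = g
    · subst hxg; rw [List.find?_cons_of_pos hq]
    · have hgxs : g ∈ xs := by
        rcases List.mem_cons.mp hg with h | h
        · exact absurd h.symm hxg
        · exact h
      have hxgt : x > g := hx g hgxs
      have hqx : q x = false := by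
        by_contra h
        rw [Bool.not_eq_false] at h
        have := hmax x (List.mem_cons_self ..) h
        omega
      rw [List.find?_cons_of_neg (by simp [hqx])]
      exact ih hxs hgxs (fun y hy hqy => hmax y (List.mem_cons_of_mem _ hy) hqy)

lemma altLoop_skip (a l b half : Int) :
    ∀ (n : Nat) (i : Int) (best : Option Int), (a + 1 - i).toNat ≤ n → 1 ≤ i →
      (∀ j, i ≤ j → j * j ≤ a → ¬(PySem.Int.mod a j = 0 ∧ j < half ∧ (j ≤ b ∨ j ≤ l))) →
      altLoop a l b half i best = best := by
  intro n
  induction n with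
  | zero =>
    intro i best hn hi hno
    rw [altLoop]
    have : ¬ (i * i ≤ a ∧ 1 ≤ i) := by
      rintro ⟨h1, h2⟩
      have h3 : i * 1 ≤ i * i := mul_le_mul_of_nonneg_left h2 (by omega)
      simp only [mul_one] at h3
      omega
    simp [this]
  | succ n ih =>
    intro i best hn hi hno
    rw [altLoop]
    by_cases hg : i * i ≤ a ∧ 1 ≤ i
    · have hc : ¬(PySem.Int.mod a i = 0 ∧ i < half ∧ (i ≤ b ∨ i ≤ l)) :=
        hno i le_rfl hg.1
      have h3 : i * 1 ≤ i * i := mul_le_mul_of_nonneg_left hg.2 (by omega)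
      simp only [mul_one] at h3
      simp only [hg, if_neg hc]
      exact ih (i + 1) best (by omega) (by omega)
        (fun j hj hja => hno j (by omega) hja)
    · simp [hg]

lemma altLoop_hit (a l b half g : Int)
    (hg1 : 1 ≤ g) (hga : g * g ≤ a)
    (hgc : PySem.Int.mod a g = 0 ∧ g < half ∧ (g ≤ b ∨ g ≤ l))
    (hmax : ∀ j, g < j → j * j ≤ a → ¬(PySem.Int.mod a j = 0 ∧ j < half ∧ (j ≤ b ∨ j ≤ l))) :
    ∀ (n : Nat) (i : Int) (best : Option Int), (a + 1 - i).toNat ≤ n → 1 ≤ i → i ≤ g →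
      altLoop a l b half i best = some g := by
  have hgle : g ≤ a := by
    have h3 : g * 1 ≤ g * g := mul_le_mul_of_nonneg_left hg1 (by omega)
    simp only [mul_one] at h3
    omega
  intro n
  induction n with
  | zero =>
    intro i best hn hi hig
    omega
  | succ n ih =>
    intro i best hn hi hig
    have hia : i * i ≤ a := by
      have : i * i ≤ g * g := mul_le_mul hig hig (by omega) (by omega)
      omega
    rw [altLoop]
    simp only [hia, hi, and_self, dif_pos]
    by_cases hieq : i = g
    · subst hieq
      rw [if_pos hgc]
      exact altLoop_skip a l b half n (i + 1) (some i) (by omega) (by omega)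
        (fun j hj hja => hmax j (by omega) hja)
    · exact ih (i + 1) _ (by omega) (by omega) (by omega)

-- main theorem body, as a standalone lemma
lemma restaurant_eq_alt (l : Int) (b : Int) : restaurant l b = restaurant_alt l b := by
  set a := l * b with ha
  set half := PySem.Int.floordiv a 2 with hhalf
  -- unfold A to find? on the reverse-sorted filtered range
  have hA : restaurant l b =
      (((PySem.List.pyRange 1 half 1).filter
          (fun i => PySem.Int.mod a i == 0 && (decide (i ≤ b) || decide (i ≤ l)))).reverse.find?
        (fun i => PySem.Int.mod a i == 0 && decide (i * i ≤ a))).map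
        (fun i => PySem.Int.floordiv a (i * i)) := by
    show aOuter a _ _ = _
    rw [PySem.List.foldl_append_if_eq_filter]
    set t := (PySem.List.pyRange 1 half 1).filter
      (fun i => PySem.Int.mod a i == 0 && (decide (i ≤ b) || decide (i ≤ l))) with ht
    have hpair : t.Pairwise (· < ·) :=
      (PySem.List.pairwise_lt_pyRange_one 1 half).filter _
    have hsorted : PySem.List.sorted t (fun x => x) true = t.reverse := by
      apply PySem.List.sorted_rev_eq_of_perm_of_pairwise_gt
      · exact t.reverse_perm
      · simpa using (List.pairwise_reverse.mpr hpair)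
    rw [List.nil_append, hsorted]
    exact aOuter_eq a t.reverse t.reverse (fun i hi => hi)
  have hmem : ∀ i, i ∈ (PySem.List.pyRange 1 half 1).filter
      (fun i => PySem.Int.mod a i == 0 && (decide (i ≤ b) || decide (i ≤ l))) ↔
      (1 ≤ i ∧ i < half ∧ PySem.Int.mod a i = 0 ∧ (i ≤ b ∨ i ≤ l)) := by
    intro i
    simp [List.mem_filter, PySem.List.mem_pyRange_one]
    tauto
  by_cases H : ∃ i, Good l b i
  · -- pick the greatest Good element
    have hbdd : ∃ ub, ∀ z, Good l b z → z ≤ ub := by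
      refine ⟨a, fun z hz => ?_⟩
      obtain ⟨hz1, _, _, _, hz5⟩ := hz
      have h3 : z * 1 ≤ z * z := mul_le_mul_of_nonneg_left hz1 (by omega)
      simp only [mul_one] at h3
      omega
    obtain ⟨g, hgood, hmax⟩ := Int.exists_greatest_of_bdd hbdd H
    obtain ⟨hg1, hg2, hg3, hg4, hg5⟩ := hgood
    -- A side
    rw [hA]
    rw [find?_greatest _ _ g]
    · -- B side
      show _ = restaurant_alt l b
      have hB : altLoop a l b half 1 none = some g := by
        apply altLoop_hit a l b half g hg1 hg5 ⟨hg3, hg2, hg4⟩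
          (fun j hj hja hc => by
            have : Good l b j := ⟨by omega, hc.2.1, hc.1, hc.2.2, hja⟩
            have := hmax j this
            omega)
          ((a + 1 - 1).toNat) 1 none le_rfl le_rfl hg1
      show _ = (match altLoop a l b half 1 none with
        | none => none
        | some best => some (PySem.Int.floordiv a (best * best)))
      rw [hB]
      simp
    · exact (List.pairwise_reverse).mpr (by
        simpa using (PySem.List.pairwise_lt_pyRange_one 1 half).filter _)
    · rw [List.mem_reverse, hmem]
      exact ⟨hg1, hg2, hg3, hg4⟩
    · simp only [Bool.and_eq_true, beq_iff_eq, decide_eq_true_eq]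
      exact ⟨hg3, hg5⟩
    · intro y hy hqy
      rw [List.mem_reverse, hmem] at hy
      simp only [Bool.and_eq_true, beq_iff_eq, decide_eq_true_eq] at hqy
      exact hmax y ⟨hy.1, hy.2.1, hy.2.2.1, hy.2.2.2, hqy.2⟩
  · -- no qualifying divisor: both none
    rw [not_exists] at H
    rw [hA]
    have hnone : (((PySem.List.pyRange 1 half 1).filter
        (fun i => PySem.Int.mod a i == 0 && (decide (i ≤ b) || decide (i ≤ l)))).reverse.find?
        (fun i => PySem.Int.mod a i == 0 && decide (i * i ≤ a))) = none := by
      rw [List.find?_eq_none]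
      intro x hx
      rw [List.mem_reverse, hmem] at hx
      intro hq
      simp only [Bool.and_eq_true, beq_iff_eq, decide_eq_true_eq] at hq
      exact H x ⟨hx.1, hx.2.1, hx.2.2.1, hx.2.2.2, hq.2⟩
    rw [hnone]
    have hB : altLoop a l b half 1 none = none := by
      apply altLoop_skip a l b half ((a + 1 - 1).toNat) 1 none le_rfl le_rfl
      intro j hj hja hc
      exact H j ⟨by omega, hc.2.1, hc.1, hc.2.2, hja⟩
    show _ = (match altLoop a l b half 1 none with
      | none => none
      | some best => some (PySem.Int.floordiv a (best * best)))
    rw [hB]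
    simp

-- ===== VERDICT (by name: the statement is the Claim_ definition above) =====
theorem restaurant_spec : Claim_equal_restaurant := by
  intro l b _
  exact restaurant_eq_alt l b
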